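-- pv_equiv track=rewrite | github.com/t1seo/ps_study | selim/level1/83201grade.py | getABCD
-- ===== SOURCE A (Python) =====
-- def getABCD(avglst):
--     ret = ''
--     for i in avglst:
--         if i >= 90:
--             ret += 'A'
--         elif i >= 80 and i < 90:
--             ret += 'B'
--         elif i >= 70 and i < 80:
--             ret += 'C'
--         elif i >= 50 and i < 70:
--             ret += 'D'
--         elif i < 50:
--             ret += 'F'
--     return ret
-- ===== SOURCE B (Python) =====
-- import bisect
--
-- _BPS = [50, 70, 80, 90]
-- _LETTERS = 'FDCBA'
--
-- def getABCD(avglst):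
--     return ''.join(_LETTERS[bisect.bisect_right(_BPS, i)] for i in avglst)
-- ===== Notes on version B (the rewrite author's own statement) =====
-- stated objective: idiomatic
-- what changed: Replaced the five-branch if/elif cascade accumulating a string with a sorted breakpoint table: bisect_right into the grade boundaries indexes the letter string, joined over the list.
import Mathlib
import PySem

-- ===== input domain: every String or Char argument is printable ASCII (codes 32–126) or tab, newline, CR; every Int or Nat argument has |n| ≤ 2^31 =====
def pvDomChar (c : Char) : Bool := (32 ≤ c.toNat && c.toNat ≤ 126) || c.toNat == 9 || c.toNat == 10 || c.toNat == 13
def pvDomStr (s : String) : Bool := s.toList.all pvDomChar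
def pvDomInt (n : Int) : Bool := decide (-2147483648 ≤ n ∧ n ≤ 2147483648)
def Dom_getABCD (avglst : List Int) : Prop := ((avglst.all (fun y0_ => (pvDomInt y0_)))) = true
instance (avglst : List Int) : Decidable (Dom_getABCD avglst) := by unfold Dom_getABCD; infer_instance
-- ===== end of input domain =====

-- B replaces A's if/elif cascade with a sorted-breakpoint table lookup (bisect_right into [50,70,80,90] indexing 'FDCBA'); objective: idiomatic.


-- ===== PORT A =====
def getABCD (avglst : List Int) : String :=
  avglst.foldl (fun ret i =>
    if i ≥ 90 then ret ++ "A"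
    else if i ≥ 80 ∧ i < 90 then ret ++ "B"
    else if i ≥ 70 ∧ i < 80 then ret ++ "C"
    else if i ≥ 50 ∧ i < 70 then ret ++ "D"
    else if i < 50 then ret ++ "F"
    else ret) ""

-- ===== PORT B =====
-- bisect.bisect_right on the sorted breakpoint list = number of breakpoints ≤ i (stdlib call ported by its contract)
def bisectRight (bps : List Int) (i : Int) : Nat := bps.countP (fun b => b ≤ i)

def getABCD_alt (avglst : List Int) : String :=
  String.ofList (avglst.map (fun i =>
    "FDCBA".toList.getD (bisectRight [50, 70, 80, 90] i) 'F'))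

-- ===== PRECONDITION & SPEC =====
def Spec_getABCD (avglst : List Int) (out : String) : Prop := out = getABCD_alt avglst
instance (avglst : List Int) (out : String) : Decidable (Spec_getABCD avglst out) := by unfold Spec_getABCD; infer_instance

-- ===== CLAIM (what is proved, stated in full; the proofs are below) =====
def Claim_equal_getABCD : Prop := ∀ (avglst : List Int), Dom_getABCD avglst → Spec_getABCD avglst (getABCD avglst)

-- ===== LEMMAS AND PROOFS =====
theorem bisectRight_char (i : Int) :
    "FDCBA".toList.getD (bisectRight [50, 70, 80, 90] i) 'F'
    = if 90 ≤ i then 'A' else if 80 ≤ i then 'B' else if 70 ≤ i then 'C'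
      else if 50 ≤ i then 'D' else 'F' := by
  have h : bisectRight [50, 70, 80, 90] i
      = if 90 ≤ i then 4 else if 80 ≤ i then 3 else if 70 ≤ i then 2
        else if 50 ≤ i then 1 else 0 := by
    simp only [bisectRight, List.countP_cons, List.countP_nil]
    split_ifs <;> simp_all <;> omega
  rw [h]; split_ifs <;> rfl

theorem stepA (ret : String) (i : Int) :
    (if i ≥ 90 then ret ++ "A"
     else if i ≥ 80 ∧ i < 90 then ret ++ "B"
     else if i ≥ 70 ∧ i < 80 then ret ++ "C"
     else if i ≥ 50 ∧ i < 70 then ret ++ "D"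
     else if i < 50 then ret ++ "F"
     else ret)
    = ret ++ String.ofList ["FDCBA".toList.getD (bisectRight [50, 70, 80, 90] i) 'F'] := by
  rw [bisectRight_char]
  split_ifs <;> first | rfl | omega

theorem getABCD_foldl_general (avglst : List Int) (ret : String) :
    avglst.foldl (fun ret i =>
      if i ≥ 90 then ret ++ "A"
      else if i ≥ 80 ∧ i < 90 then ret ++ "B"
      else if i ≥ 70 ∧ i < 80 then ret ++ "C"
      else if i ≥ 50 ∧ i < 70 then ret ++ "D"
      else if i < 50 then ret ++ "F"
      else ret) ret
    = ret ++ String.ofList (avglst.map (fun i =>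
        "FDCBA".toList.getD (bisectRight [50, 70, 80, 90] i) 'F')) := by
  induction avglst generalizing ret with
  | nil => simp
  | cons i rest ih =>
    have hsplit : ∀ (c : Char) (l : List Char),
        String.ofList (c :: l) = String.ofList [c] ++ String.ofList l := by
      intro c l
      have h : ([c] ++ l) = c :: l := rfl
      rw [← h, String.ofList_append]
    rw [List.foldl_cons, stepA, ih, List.map_cons]
    conv_rhs => rw [hsplit]
    rw [← String.append_assoc]

-- ===== VERDICT (by name: the statement is the Claim_ definition above) =====
theorem getABCD_spec : Claim_equal_getABCD := by
  intro avglst _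
  unfold Spec_getABCD getABCD getABCD_alt
  simpa using getABCD_foldl_general avglst ""
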